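-- pv_equiv track=rewrite | github.com/SeyedHashtag/dijiq | core/scripts/telegrambot/utils/username_utils.py | allocate_username
-- ===== SOURCE A (Python) =====
-- def _alpha_suffix(index):
--     """Convert 0-based index to suffix: 0->'', 1->a, 26->z, 27->aa ..."""
--     if index <= 0:
--         return ""
--     chars = []
--     value = index
--     while value > 0:
--         value -= 1
--         chars.append(chr(ord("a") + (value % 26)))
--         value //= 26
--     return "".join(reversed(chars))
--
-- def allocate_username(prefix, telegram_id, existing_usernames):
--     """Allocate first available username using alphabetical collision suffixes."""
--     base = f"{prefix}{telegram_id}"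
--     existing_lower = {
--         username.lower()
--         for username in existing_usernames
--         if isinstance(username, str) and username
--     }
--
--     index = 0
--     while True:
--         candidate = f"{base}{_alpha_suffix(index)}"
--         if candidate.lower() not in existing_lower:
--             return candidate
--         index += 1
-- ===== SOURCE B (Python) =====
-- import itertools
-- import string
--
--
-- def allocate_username(prefix, telegram_id, existing_usernames):
--     """Allocate first available username using alphabetical collision suffixes."""
--     base = f"{prefix}{telegram_id}"
--     existing_lower = {
--         username.lower()
--         for username in existing_usernames
--         if isinstance(username, str) and username
--     }
--     for length in itertools.count(0):
--         for letters in itertools.product(string.ascii_lowercase, repeat=length):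
--             candidate = base + "".join(letters)
--             if candidate.lower() not in existing_lower:
--                 return candidate
-- ===== Notes on version B (the rewrite author's own statement) =====
-- stated objective: idiomatic
-- what changed: Replaces the bijective base-26 index-to-suffix converter and the counting while-loop with direct generation of the suffix stream via itertools.count over lengths and itertools.product over lowercase letters, returning the first free candidate.
import Mathlib
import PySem

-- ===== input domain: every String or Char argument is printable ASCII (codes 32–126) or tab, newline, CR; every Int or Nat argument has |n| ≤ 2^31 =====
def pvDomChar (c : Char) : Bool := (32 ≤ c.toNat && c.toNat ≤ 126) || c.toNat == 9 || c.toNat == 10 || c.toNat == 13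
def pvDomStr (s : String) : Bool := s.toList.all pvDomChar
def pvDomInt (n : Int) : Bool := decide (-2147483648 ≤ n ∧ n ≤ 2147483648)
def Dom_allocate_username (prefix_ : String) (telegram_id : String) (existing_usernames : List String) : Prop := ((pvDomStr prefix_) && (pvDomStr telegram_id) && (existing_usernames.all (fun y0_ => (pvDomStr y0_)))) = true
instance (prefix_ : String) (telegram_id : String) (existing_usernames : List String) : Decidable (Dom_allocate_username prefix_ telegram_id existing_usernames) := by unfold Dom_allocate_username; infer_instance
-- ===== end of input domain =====

-- B replaces A's bijective base-26 index→suffix converter and counting while-loop by direct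
-- generation of the suffix stream (itertools.count over lengths × itertools.product of letters);
-- objective: idiomatic. Strings are carried as char lists (PySem.Chars), String.ofList at the boundary.

-- ===== PORT A =====
-- while value > 0: value -= 1; chars.append(chr(ord('a') + value % 26)); value //= 26
def alphaGoA : Nat → List Char → List Char
  | 0, chars => chars
  | v+1, chars => alphaGoA (v / 26) (chars ++ [Char.ofNat (97 + v % 26)])
  termination_by v _ => v
  decreasing_by exact Nat.lt_succ_of_le (Nat.div_le_self v 26)

-- _alpha_suffix(index) ; '"".join(reversed(chars))'
def alphaSuffixA (index : Nat) : List Char :=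
  if index = 0 then [] else (alphaGoA index []).reverse

-- the set comprehension: { username.lower() for username in existing_usernames if username }
def existingLowerA (existing_usernames : List String) : PySem.Set (List Char) :=
  PySem.Set.ofList
    ((existing_usernames.filter (fun u => !u.toList.isEmpty)).map
      (fun u => PySem.Chars.lower u.toList))

-- the 'while True' loop; fuel existing_usernames.length + 1 is enough: the candidates'
-- lowercases are pairwise distinct (proved below), so the default branch is unreachable
def loopA (base : List Char) (existing_lower : PySem.Set (List Char)) : Nat → Nat → List Char
  | 0, _ => []
  | fuel+1, index =>
    let candidate := base ++ alphaSuffixA index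
    if PySem.Set.contains existing_lower (PySem.Chars.lower candidate) then
      loopA base existing_lower fuel (index + 1)
    else candidate

def allocate_username (prefix_ : String) (telegram_id : String) (existing_usernames : List String) : String :=
  String.ofList (loopA (prefix_.toList ++ telegram_id.toList) (existingLowerA existing_usernames)
    (existing_usernames.length + 1) 0)

-- ===== PORT B =====
def lettersB : List Char := "abcdefghijklmnopqrstuvwxyz".toList

-- itertools.product(string.ascii_lowercase, repeat=length), in product order
-- (CPython builds result = [x+[y] for x in result for y in pool], one pool at a time)
def productB : Nat → List (List Char)
  | 0 => [[]]
  | l+1 => (productB l).flatMap (fun s => lettersB.map (fun c => s ++ [c]))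

def existingLowerB (existing_usernames : List String) : PySem.Set (List Char) :=
  PySem.Set.ofList
    ((existing_usernames.filter (fun u => !u.toList.isEmpty)).map
      (fun u => PySem.Chars.lower u.toList))

-- 'for length in itertools.count(0): for letters in product(...): if free: return';
-- fuel existing_usernames.length + 1 lengths suffice (≥ one candidate per length)
def loopB (base : List Char) (existing_lower : PySem.Set (List Char)) : Nat → Nat → List Char
  | 0, _ => []
  | fuel+1, length =>
    match (productB length).find?
        (fun s => !(PySem.Set.contains existing_lower (PySem.Chars.lower (base ++ s)))) with
    | some s => base ++ s
    | none => loopB base existing_lower fuel (length + 1)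

def allocate_username_alt (prefix_ : String) (telegram_id : String) (existing_usernames : List String) : String :=
  String.ofList (loopB (prefix_.toList ++ telegram_id.toList) (existingLowerB existing_usernames)
    (existing_usernames.length + 1) 0)

-- ===== PRECONDITION & SPEC =====
def Spec_allocate_username (prefix_ : String) (telegram_id : String) (existing_usernames : List String) (out : String) : Prop := out = allocate_username_alt prefix_ telegram_id existing_usernames
instance (prefix_ : String) (telegram_id : String) (existing_usernames : List String) (out : String) : Decidable (Spec_allocate_username prefix_ telegram_id existing_usernames out) := by unfold Spec_allocate_username; infer_instance

-- ===== CLAIM (what is proved, stated in full; the proofs are below) =====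
def Claim_equal_allocate_username : Prop := ∀ (prefix_ : String) (telegram_id : String) (existing_usernames : List String), Dom_allocate_username prefix_ telegram_id existing_usernames → Spec_allocate_username prefix_ telegram_id existing_usernames (allocate_username prefix_ telegram_id existing_usernames)

-- ===== LEMMAS AND PROOFS =====

-- front-building form of A's suffix (proof vehicle)
def alphaF : Nat → List Char
  | 0 => []
  | v+1 => alphaF (v / 26) ++ [Char.ofNat (97 + v % 26)]
  termination_by v => v
  decreasing_by exact Nat.lt_succ_of_le (Nat.div_le_self v 26)

-- number of suffixes of length < l
def scount : Nat → Nat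
  | 0 => 0
  | l+1 => 26 * scount l + 1

-- number of candidates examined by loopB with fuel f starting at length l
def tcount : Nat → Nat → Nat
  | 0, _ => 0
  | f+1, l => 26 ^ l + tcount f (l + 1)

-- flat search over indices, the common shape of both loops
def loopF (base : List Char) (S : PySem.Set (List Char)) : Nat → Nat → List Char
  | 0, _ => []
  | f+1, i =>
    let c := base ++ alphaF i
    if PySem.Set.contains S (PySem.Chars.lower c) then loopF base S f (i + 1) else c

theorem alphaGoA_acc : ∀ (v : Nat) (acc : List Char), alphaGoA v acc = acc ++ alphaGoA v []
  | 0, acc => by simp [alphaGoA]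
  | v+1, acc => by
    have h1 := alphaGoA_acc (v / 26) (acc ++ [Char.ofNat (97 + v % 26)])
    have h2 := alphaGoA_acc (v / 26) ([] ++ [Char.ofNat (97 + v % 26)])
    simp only [alphaGoA]
    rw [h1, h2]; simp
  termination_by v _ => v
  decreasing_by all_goals exact Nat.lt_succ_of_le (Nat.div_le_self v 26)

theorem reverse_alphaGoA : ∀ v : Nat, (alphaGoA v []).reverse = alphaF v
  | 0 => by simp [alphaGoA, alphaF]
  | v+1 => by
    have h := reverse_alphaGoA (v / 26)
    simp only [alphaGoA, alphaF]
    rw [alphaGoA_acc]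
    simp [h]
  termination_by v => v
  decreasing_by exact Nat.lt_succ_of_le (Nat.div_le_self v 26)

theorem alphaSuffixA_eq (i : Nat) : alphaSuffixA i = alphaF i := by
  cases i with
  | zero => simp [alphaSuffixA, alphaF]
  | succ v => simp [alphaSuffixA, reverse_alphaGoA]

theorem length_productB (l : Nat) : (productB l).length = 26 ^ l := by
  induction l with
  | zero => simp [productB]
  | succ l ih =>
    simp [productB, List.length_flatMap, lettersB, ih, pow_succ, Nat.mul_comm]

theorem lettersB_get (k : Nat) (h : k < 26) : lettersB[k]? = some (Char.ofNat (97 + k)) := by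
  interval_cases k <;> rfl

theorem flatMap_fixed_get (xs : List (List Char)) (j : Nat) :
    (xs.flatMap (fun s => lettersB.map (fun c => s ++ [c])))[j]? =
      (xs[j / 26]?).bind (fun s => (lettersB[j % 26]?).map (fun c => s ++ [c])) := by
  induction xs generalizing j with
  | nil => simp
  | cons s t ih =>
    have hlen : (lettersB.map (fun c => s ++ [c])).length = 26 := by simp [lettersB]
    by_cases hj : j < 26
    · rw [List.flatMap_cons, List.getElem?_append_left (by rw [hlen]; exact hj)]
      have hd : j / 26 = 0 := Nat.div_eq_of_lt hj
      have hm : j % 26 = j := Nat.mod_eq_of_lt hj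
      simp [hd, hm]
    · rw [List.flatMap_cons, List.getElem?_append_right (by rw [hlen]; omega), hlen,
        ih (j - 26)]
      have hd : j / 26 = (j - 26) / 26 + 1 := by omega
      have hm : j % 26 = (j - 26) % 26 := by omega
      rw [hd, hm]
      simp

theorem productB_get (l : Nat) : ∀ j, j < 26 ^ l → (productB l)[j]? = some (alphaF (scount l + j)) := by
  induction l with
  | zero =>
    intro j hj
    interval_cases j
    simp [productB, scount, alphaF]
  | succ l ih =>
    intro j hj
    have hj26 : j / 26 < 26 ^ l := by
      rw [Nat.div_lt_iff_lt_mul (by norm_num)]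
      calc j < 26 ^ (l+1) := hj
        _ = 26 ^ l * 26 := by rw [pow_succ]
    have hm : j % 26 < 26 := Nat.mod_lt _ (by norm_num)
    rw [productB, flatMap_fixed_get, ih (j / 26) hj26, lettersB_get (j % 26) hm]
    have hidx : scount (l+1) + j = (26 * scount l + j) + 1 := by
      simp only [scount]; omega
    have hdiv : (26 * scount l + j) / 26 = scount l + j / 26 := by omega
    have hmod : (26 * scount l + j) % 26 = j % 26 := by omega
    rw [hidx]
    conv_rhs => rw [alphaF]
    rw [hdiv, hmod]
    simp

theorem loopA_eq_loopF (base : List Char) (S : PySem.Set (List Char)) :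
    ∀ f i, loopA base S f i = loopF base S f i := by
  intro f
  induction f with
  | zero => intro i; simp [loopA, loopF]
  | succ f ih =>
    intro i
    simp only [loopA, loopF, alphaSuffixA_eq]
    split <;> simp [ih]

theorem scount_aux : ∀ l : Nat, 25 * scount l + 1 = 26 ^ l := by
  intro l
  induction l with
  | zero => simp [scount]
  | succ l ih =>
    rw [scount, pow_succ]
    generalize (26:Nat) ^ l = a at ih ⊢
    omega

theorem scount_succ (l : Nat) : scount (l + 1) = scount l + 26 ^ l := by
  have := scount_aux l
  rw [scount]
  generalize (26:Nat) ^ l = a at this ⊢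
  omega

theorem loopF_block (base : List Char) (S : PySem.Set (List Char)) :
    ∀ (xs : List (List Char)) (i rest : Nat),
      (∀ j, j < xs.length → xs[j]? = some (alphaF (i + j))) →
      loopF base S (xs.length + rest) i =
        (match xs.find? (fun s => !(PySem.Set.contains S (PySem.Chars.lower (base ++ s)))) with
          | some s => base ++ s
          | none => loopF base S rest (i + xs.length)) := by
  intro xs
  induction xs with
  | nil => intro i rest _; simp
  | cons s t ih =>
    intro i rest hyp
    have hs : s = alphaF i := by
      have h0 := hyp 0 (by simp)
      simpa using h0
    have hl : (s :: t).length + rest = (t.length + rest) + 1 := by simp; omega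
    rw [hl, loopF, List.find?_cons]
    cases hc : PySem.Set.contains S (PySem.Chars.lower (base ++ alphaF i)) with
    | false =>
      have hmem : PySem.Chars.lower (base ++ alphaF i) ∉ S := by
        simpa [PySem.Set.contains] using hc
      simp [hs, hmem]
    | true =>
      have hshift : ∀ j, j < t.length → t[j]? = some (alphaF ((i+1) + j)) := by
        intro j hj
        have := hyp (j+1) (by simp; omega)
        simpa [Nat.add_assoc, Nat.add_comm 1 j] using this
      have harith : i + (s :: t).length = (i + 1) + t.length := by simp; omega
      rw [harith] at *
      simp only [hs, hc, Bool.not_true]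
      simpa using ih (i+1) rest hshift

theorem loopB_eq_loopF (base : List Char) (S : PySem.Set (List Char)) :
    ∀ f l, loopB base S f l = loopF base S (tcount f l) (scount l) := by
  intro f
  induction f with
  | zero => intro l; simp [loopB, tcount, loopF]
  | succ f ih =>
    intro l
    have hyp : ∀ j, j < (productB l).length → (productB l)[j]? = some (alphaF (scount l + j)) := by
      intro j hj
      exact productB_get l j (by rwa [length_productB] at hj)
    have hblock := loopF_block base S (productB l) (scount l) (tcount f (l+1)) hyp
    have hfuel : tcount (f+1) l = (productB l).length + tcount f (l+1) := by
      rw [tcount, length_productB]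
    rw [loopB, hfuel, hblock]
    cases hfind : (productB l).find?
        (fun s => !(PySem.Set.contains S (PySem.Chars.lower (base ++ s)))) with
    | some s => rfl
    | none =>
      have hnext : scount l + (productB l).length = scount (l+1) := by
        rw [length_productB, ← scount_succ]
      rw [hnext]
      exact ih (l+1)

theorem tcount_ge (f : Nat) : ∀ l, f ≤ tcount f l := by
  induction f with
  | zero => intro l; simp [tcount]
  | succ f ih =>
    intro l
    have h1 : 1 ≤ 26 ^ l := Nat.one_le_pow l 26 (by norm_num)
    have := ih (l+1)
    rw [tcount]
    omega

theorem loopF_fuel (base : List Char) (S : PySem.Set (List Char)) :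
    ∀ j f f' i, j < f → j < f' →
      PySem.Set.contains S (PySem.Chars.lower (base ++ alphaF (i + j))) = false →
      loopF base S f i = loopF base S f' i := by
  intro j
  induction j with
  | zero =>
    intro f f' i hf hf' hp
    cases f with
    | zero => omega
    | succ fa =>
      cases f' with
      | zero => omega
      | succ fb =>
        simp only [Nat.add_zero] at hp
        have hmem : PySem.Chars.lower (base ++ alphaF i) ∉ S := by
          simpa [PySem.Set.contains] using hp
        simp [loopF, hmem]
  | succ j ih =>
    intro f f' i hf hf' hp
    cases f with
    | zero => omega
    | succ fa =>
      cases f' with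
      | zero => omega
      | succ fb =>
        by_cases hc : PySem.Chars.lower (base ++ alphaF i) ∈ S
        · have hct : PySem.Set.contains S (PySem.Chars.lower (base ++ alphaF i)) = true := by
            simpa [PySem.Set.contains] using hc
          simp only [loopF, hct, if_pos]
          exact ih fa fb (i+1) (by omega) (by omega)
            (by rwa [show (i+1) + j = i + (j+1) by omega])
        · simp [loopF, hc]

theorem lowerChar_letter (k : Nat) (h : k < 26) :
    PySem.Chars.lowerChar (Char.ofNat (97 + k)) = Char.ofNat (97 + k) := by
  interval_cases k <;> rfl

theorem lower_append (a b : List Char) :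
    PySem.Chars.lower (a ++ b) = PySem.Chars.lower a ++ PySem.Chars.lower b := by
  simp [PySem.Chars.lower]

theorem lower_alphaF : ∀ v : Nat, PySem.Chars.lower (alphaF v) = alphaF v
  | 0 => by simp [alphaF, PySem.Chars.lower]
  | v+1 => by
    have h := lower_alphaF (v / 26)
    rw [alphaF, lower_append, h]
    simp [PySem.Chars.lower, lowerChar_letter (v % 26) (Nat.mod_lt _ (by norm_num))]
  termination_by v => v
  decreasing_by exact Nat.lt_succ_of_le (Nat.div_le_self v 26)

theorem charofnat_letter_inj (a b : Nat) (ha : a < 26) (hb : b < 26)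
    (h : Char.ofNat (97 + a) = Char.ofNat (97 + b)) : a = b := by
  have hva : (97 + a).isValidChar := Or.inl (by omega)
  have hvb : (97 + b).isValidChar := Or.inl (by omega)
  have := congrArg Char.toNat h
  simp [Char.ofNat, hva, hvb] at this
  omega

theorem alphaF_inj : ∀ v w : Nat, alphaF v = alphaF w → v = w
  | 0, 0, _ => rfl
  | 0, _+1, h => by
    rw [alphaF, alphaF] at h
    exact absurd h.symm (by simp)
  | v+1, 0, h => by
    rw [alphaF, alphaF] at h
    exact absurd h (by simp)
  | v+1, w+1, h => by
    rw [alphaF, alphaF] at h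
    obtain ⟨h1, h2⟩ := List.append_inj' h rfl
    have hc : v % 26 = w % 26 := by
      have := charofnat_letter_inj (v % 26) (w % 26)
        (Nat.mod_lt _ (by norm_num)) (Nat.mod_lt _ (by norm_num)) (by simpa using h2)
      exact this
    have hd := alphaF_inj (v / 26) (w / 26) h1
    omega
  termination_by v _ => v
  decreasing_by exact Nat.lt_succ_of_le (Nat.div_le_self v 26)

theorem foldl_add_len (l : List (List Char)) :
    ∀ s : PySem.Set (List Char), (l.foldl PySem.Set.add s).length ≤ s.length + l.length := by
  induction l with
  | nil => intro s; simp
  | cons x t ih =>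
    intro s
    have hadd : (PySem.Set.add s x).length ≤ s.length + 1 := by
      simp only [PySem.Set.add]
      split
      · omega
      · simp
    calc ((x :: t).foldl PySem.Set.add s).length
        = (t.foldl PySem.Set.add (PySem.Set.add s x)).length := by simp
      _ ≤ (PySem.Set.add s x).length + t.length := ih _
      _ ≤ s.length + 1 + t.length := by omega
      _ = s.length + (x :: t).length := by simp; omega

theorem set_len_le (existing : List String) :
    (existingLowerA existing).length ≤ existing.length := by
  unfold existingLowerA
  rw [PySem.Set.ofList_eq_foldl]
  have h1 := foldl_add_len ((existing.filter (fun u => !u.toList.isEmpty)).map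
      (fun u => PySem.Chars.lower u.toList)) []
  have h2 : ((existing.filter (fun u => !u.toList.isEmpty)).map
      (fun u => PySem.Chars.lower u.toList)).length ≤ existing.length := by
    rw [List.length_map]
    exact List.length_filter_le _ _
  simp only [List.length_nil] at h1
  omega

theorem exists_free (base : List Char) (existing : List String) :
    ∃ j, j < existing.length + 1 ∧
      PySem.Set.contains (existingLowerA existing) (PySem.Chars.lower (base ++ alphaF j)) = false := by
  by_contra hcon
  push Not at hcon
  have hall : ∀ j, j < existing.length + 1 →
      PySem.Chars.lower (base ++ alphaF j) ∈ existingLowerA existing := by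
    intro j hj
    have := hcon j hj
    have ht : PySem.Set.contains (existingLowerA existing)
        (PySem.Chars.lower (base ++ alphaF j)) = true := by
      cases hb : PySem.Set.contains (existingLowerA existing)
          (PySem.Chars.lower (base ++ alphaF j)) with
      | false => exact absurd hb this
      | true => rfl
    simpa [PySem.Set.contains] using ht
  have hfun : ∀ j : Nat, PySem.Chars.lower (base ++ alphaF j)
      = PySem.Chars.lower base ++ alphaF j := by
    intro j; rw [lower_append, lower_alphaF]
  have hinj : Function.Injective (fun j : Nat => PySem.Chars.lower (base ++ alphaF j)) := by
    intro a b hab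
    simp only [hfun] at hab
    exact alphaF_inj a b (List.append_cancel_left hab)
  have hnodup : ((List.range (existing.length + 1)).map
      (fun j => PySem.Chars.lower (base ++ alphaF j))).Nodup :=
    (List.nodup_range).map hinj
  have hsub : ((List.range (existing.length + 1)).map
      (fun j => PySem.Chars.lower (base ++ alphaF j))) ⊆ existingLowerA existing := by
    intro x hx
    obtain ⟨j, hj, rfl⟩ := List.mem_map.mp hx
    exact hall j (List.mem_range.mp hj)
  have hle := (List.subperm_of_subset hnodup hsub).length_le
  have hlen : ((List.range (existing.length + 1)).map
      (fun j => PySem.Chars.lower (base ++ alphaF j))).length = existing.length + 1 := by simp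
  have := set_len_le existing
  omega

-- ===== VERDICT (by name: the statement is the Claim_ definition above) =====
theorem allocate_username_spec : Claim_equal_allocate_username := by
  intro prefix_ telegram_id existing _
  unfold Spec_allocate_username allocate_username allocate_username_alt
  have hSB : existingLowerB existing = existingLowerA existing := rfl
  rw [hSB]
  congr 1
  rw [loopA_eq_loopF, loopB_eq_loopF]
  obtain ⟨j, hj, hfree⟩ := exists_free (prefix_.toList ++ telegram_id.toList) existing
  have h2 : j < tcount (existing.length + 1) 0 :=
    lt_of_lt_of_le hj (tcount_ge (existing.length + 1) 0)
  have hmain := loopF_fuel (prefix_.toList ++ telegram_id.toList) (existingLowerA existing)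
    j (existing.length + 1) (tcount (existing.length + 1) 0) 0 hj h2 (by simpa using hfree)
  simpa [scount] using hmain
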